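-- pv_equiv track=rewrite | github.com/tykavanaugh/rfuck | helpers.py | sum_words
-- ===== SOURCE A (Python) =====
-- def sum_words(str_slice):
--     out_val = 0
--     if " " not in str_slice:
--         return len(str_slice)
--     words_list = str_slice.split()
--     words_list.reverse()
--     for i,word in enumerate(words_list):
--         if word != "nothing" or word != "none" or word != 'no' or word != 'not':
--             out_val += len(word) * 10**i
--     return out_val
-- ===== SOURCE B (Python) =====
-- def sum_words(str_slice):
--     if " " not in str_slice:
--         return len(str_slice)
--     acc = 0
--     for word in str_slice.split():
--         acc = acc * 10 + len(word)
--     return acc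
-- ===== Notes on version B (the rewrite author's own statement) =====
-- stated objective: simpler
-- what changed: Replaces reverse+enumerate+10**i power sum (with a vacuous != chain) by a Horner accumulator acc = acc*10 + len(word) over the words in original order.
import Mathlib
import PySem

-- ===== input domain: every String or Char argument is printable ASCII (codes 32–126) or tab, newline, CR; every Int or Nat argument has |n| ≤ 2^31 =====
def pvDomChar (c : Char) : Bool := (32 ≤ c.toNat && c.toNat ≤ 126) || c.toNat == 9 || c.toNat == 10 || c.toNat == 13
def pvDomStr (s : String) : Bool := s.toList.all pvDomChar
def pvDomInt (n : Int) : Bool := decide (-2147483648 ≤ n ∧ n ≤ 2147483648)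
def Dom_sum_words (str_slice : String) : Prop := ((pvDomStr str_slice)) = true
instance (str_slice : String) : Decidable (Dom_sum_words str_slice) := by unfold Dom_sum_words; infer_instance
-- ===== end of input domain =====

-- B replaces A's reverse+enumerate+10**i weighted sum by a Horner accumulator over the words in order (objective: simpler).


-- ===== PORT A =====
def sum_words (str_slice : String) : Int :=
  let out_val : Int := 0
  if ¬ (PySem.Str.isIn " " str_slice = true) then PySem.Str.len str_slice
  else
    let words_list := PySem.Str.split₀ str_slice
    let words_list := words_list.reverse
    (PySem.List.enumerate words_list 0).foldl
      (fun out_val iw =>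
        if (iw.2 != "nothing") || (iw.2 != "none") || (iw.2 != "no") || (iw.2 != "not")
        then out_val + PySem.Str.len iw.2 * 10 ^ iw.1.toNat
        else out_val)
      out_val

-- ===== PORT B =====
def sum_words_alt (str_slice : String) : Int :=
  if ¬ (PySem.Str.isIn " " str_slice = true) then PySem.Str.len str_slice
  else (PySem.Str.split₀ str_slice).foldl (fun acc w => acc * 10 + PySem.Str.len w) 0

-- ===== PRECONDITION & SPEC =====
def Spec_sum_words (str_slice : String) (out : Int) : Prop := out = sum_words_alt str_slice
instance (str_slice : String) (out : Int) : Decidable (Spec_sum_words str_slice out) := by unfold Spec_sum_words; infer_instance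

-- ===== CLAIM (what is proved, stated in full; the proofs are below) =====
def Claim_equal_sum_words : Prop := ∀ (str_slice : String), Dom_sum_words str_slice → Spec_sum_words str_slice (sum_words str_slice)

-- ===== LEMMAS AND PROOFS =====

-- A's != chain is vacuously true: a word cannot equal both "nothing" and "none".
theorem pv_cond_true (w : String) :
    ((w != "nothing") || (w != "none") || (w != "no") || (w != "not")) = true := by
  by_cases h : w = "nothing"
  · subst h; decide
  · simp [bne, h]

-- the weighted sum A computes, as a recursive function on the list and a Nat start index
def wsum : List String → Nat → Int
  | [], _ => 0
  | w :: l, s => PySem.Str.len w * 10 ^ s + wsum l (s + 1)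

theorem foldA_eq_wsum (l : List String) (s : Nat) (a : Int) :
    (PySem.List.enumerate l (s : Int)).foldl
      (fun out_val iw =>
        if (iw.2 != "nothing") || (iw.2 != "none") || (iw.2 != "no") || (iw.2 != "not")
        then out_val + PySem.Str.len iw.2 * 10 ^ iw.1.toNat
        else out_val) a = a + wsum l s := by
  induction l generalizing s a with
  | nil => simp [PySem.List.enumerate_nil, wsum]
  | cons w l ih =>
    rw [PySem.List.enumerate_cons]
    simp only [List.foldl_cons, wsum]
    have hcast : ((s : Int) + 1) = ((s + 1 : Nat) : Int) := by push_cast; ring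
    rw [hcast, ih]
    simp only [Int.toNat_natCast]
    split_ifs with hc
    · ring
    · exact absurd (pv_cond_true w) hc

theorem wsum_append (l₁ l₂ : List String) (s : Nat) :
    wsum (l₁ ++ l₂) s = wsum l₁ s + wsum l₂ (s + l₁.length) := by
  induction l₁ generalizing s with
  | nil => simp [wsum]
  | cons w l ih =>
    simp only [List.cons_append, wsum, ih, List.length_cons]
    ring_nf

theorem foldB_shift (l : List String) (a : Int) :
    l.foldl (fun acc w => acc * 10 + PySem.Str.len w) a
      = a * 10 ^ l.length + l.foldl (fun acc w => acc * 10 + PySem.Str.len w) 0 := by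
  induction l generalizing a with
  | nil => simp
  | cons w l ih =>
    simp only [List.foldl_cons, List.length_cons]
    rw [ih (a * 10 + PySem.Str.len w), ih (0 * 10 + PySem.Str.len w)]
    ring

theorem horner_eq_wsum_reverse (l : List String) :
    l.foldl (fun acc w => acc * 10 + PySem.Str.len w) 0 = wsum l.reverse 0 := by
  induction l with
  | nil => simp [wsum]
  | cons w l ih =>
    simp only [List.foldl_cons, List.reverse_cons]
    rw [wsum_append, foldB_shift, ih]
    simp [wsum]
    ring

-- ===== VERDICT (by name: the statement is the Claim_ definition above) =====
theorem sum_words_spec : Claim_equal_sum_words := by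
  intro s _
  unfold Spec_sum_words sum_words sum_words_alt
  by_cases h : PySem.Str.isIn " " s = true
  · rw [if_neg (not_not_intro h), if_neg (not_not_intro h)]
    have hA := foldA_eq_wsum (PySem.Str.split₀ s).reverse 0 0
    simp only [Nat.cast_zero, zero_add] at hA
    rw [hA, horner_eq_wsum_reverse]
  · rw [if_pos h, if_pos h]
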